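-- pv_equiv track=rewrite | github.com/iteebz/shitlint | python/src/shitlint/rules/abstraction.py | _calculate_inheritance_depth
-- ===== SOURCE A (Python) =====
-- from typing import List, Dict, Set
--
-- def _calculate_inheritance_depth(class_name: str, class_info: Dict, visited: Set[str]) -> int:
--     """Calculate inheritance depth for a class."""
--     if class_name in visited or class_name not in class_info:
--         return 0
--
--     visited.add(class_name)
--     bases = class_info[class_name]['bases']
--
--     if not bases:
--         return 1
--
--     max_depth = 0
--     for base in bases:
--         depth = _calculate_inheritance_depth(base, class_info, visited.copy())
--         max_depth = max(max_depth, depth)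
--
--     return max_depth + 1
-- ===== SOURCE B (Python) =====
-- def _calculate_inheritance_depth(class_name, class_info, visited):
--     """Iterative value-iteration DP over the whole hierarchy (no recursion, no visited copies)."""
--     if class_name in visited or class_name not in class_info:
--         return 0
--     depth = {c: 0 for c in class_info}
--     for _ in range(len(class_info) + 1):
--         depth = {c: _next_depth(c, info, depth, visited) for c, info in class_info.items()}
--     return depth[class_name]
--
-- def _next_depth(c, info, depth, visited):
--     if c in visited:
--         return 0
--     bases = info.get('bases', [])
--     if not bases:
--         return 1
--     return 1 + max(depth.get(b, 0) for b in bases)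
-- ===== Notes on version B (the rewrite author's own statement) =====
-- stated objective: alternative
-- what changed: A's path-copying recursion (one recursive call per inheritance path, with a visited-set copy at each call) is replaced by an iterative value-iteration DP: one depth table over all classes, updated len(class_info)+1 rounds, then a single lookup; Pre_ restricts to acyclic hierarchies (the natural domain of Python class inheritance) with the 'bases' key present on every class A reads.
-- outside the precondition, e.g. on _calculate_inheritance_depth('A', {'A': {'bases': ['B']}, 'B': {'bases': ['A']}}, set()): A returns 2, B returns 3
import Mathlib
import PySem

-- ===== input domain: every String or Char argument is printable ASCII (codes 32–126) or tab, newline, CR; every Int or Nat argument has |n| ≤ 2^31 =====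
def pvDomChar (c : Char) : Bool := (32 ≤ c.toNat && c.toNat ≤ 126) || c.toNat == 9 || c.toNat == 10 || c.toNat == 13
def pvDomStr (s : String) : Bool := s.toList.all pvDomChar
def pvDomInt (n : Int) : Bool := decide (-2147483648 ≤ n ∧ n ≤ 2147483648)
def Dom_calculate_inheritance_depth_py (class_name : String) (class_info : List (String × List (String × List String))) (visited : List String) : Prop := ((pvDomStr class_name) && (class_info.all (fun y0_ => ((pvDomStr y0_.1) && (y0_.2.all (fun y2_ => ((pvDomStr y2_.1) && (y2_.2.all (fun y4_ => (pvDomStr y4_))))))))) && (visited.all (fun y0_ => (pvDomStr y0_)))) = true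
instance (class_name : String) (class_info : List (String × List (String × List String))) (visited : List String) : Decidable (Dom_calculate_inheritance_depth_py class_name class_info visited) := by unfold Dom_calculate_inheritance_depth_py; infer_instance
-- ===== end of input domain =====

-- B computes the same depths by an iterative value-iteration DP over one depth table instead of
-- A's path-copying recursion (equal return values; A also mutates its `visited` argument in
-- place, B does not — the equivalence proved here is about the return value only).

-- Shared primitive: Python dict lookup on an association list (first match), with default.
def pvLookupD {β : Type} (l : List (String × β)) (k : String) (d : β) : β :=
  match l.find? (fun kv => kv.1 == k) with
  | some kv => kv.2
  | none => d

-- class_info[c]['bases'] read totally: exact wherever Python does not raise (Pre_ guarantees the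
-- 'bases' key is present on every class A actually reads).
def pvBasesOf (class_info : List (String × List (String × List String))) (c : String) : List String :=
  pvLookupD (pvLookupD class_info c []) "bases" []

-- Termination measure for port A: number of class_info keys not yet visited.
def pvCountFree (class_info : List (String × List (String × List String))) (visited : List String) : Nat :=
  ((class_info.map Prod.fst).filter (fun k => !(visited.contains k))).length

-- Strict decrease of a filter count when the predicate strengthens and loses a present element
-- (cited by port A's decreasing_by).
theorem pvFilterStrict {α : Type} (l : List α) (p q : α → Bool)
    (himp : ∀ x, q x = true → p x = true) (a : α) (ha : a ∈ l)
    (hpa : p a = true) (hqa : q a = false) :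
    (l.filter q).length < (l.filter p).length := by
  simp only [← List.countP_eq_length_filter]
  obtain ⟨l₁, l₂, rfl⟩ := List.append_of_mem ha
  rw [List.countP_append, List.countP_append, List.countP_cons, List.countP_cons]
  have h1 : l₁.countP q ≤ l₁.countP p := List.countP_mono_left (fun x _ h => himp x h)
  have h2 : l₂.countP q ≤ l₂.countP p := List.countP_mono_left (fun x _ h => himp x h)
  simp only [hpa, hqa]
  simp only [if_true, Bool.false_eq_true, if_false]
  omega

theorem pvCountFree_add_lt (class_info : List (String × List (String × List String)))
    (visited : List String) (c : String)
    (hv : visited.contains c = false)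
    (hk : (class_info.map Prod.fst).contains c = true) :
    pvCountFree class_info (PySem.Set.add visited c) < pvCountFree class_info visited := by
  unfold pvCountFree
  have hcmem : c ∉ visited := by
    intro h; rw [List.contains_iff_mem.mpr h] at hv; cases hv
  rw [PySem.Set.add_of_not_mem hcmem]
  apply pvFilterStrict (class_info.map Prod.fst)
    (fun k => !(visited.contains k)) (fun k => !((visited ++ [c]).contains k))
    ?_ c (List.contains_iff_mem.mp hk) (by simpa using hcmem) (by simp)
  intro x hx
  simp only [Bool.not_eq_true', ← Bool.not_eq_true, List.contains_iff_mem] at hx ⊢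
  exact fun h => hx (List.mem_append_left _ h)

-- ===== PORT A =====
mutual
-- literal transliteration of _calculate_inheritance_depth (A)
def calculate_inheritance_depth_py (class_name : String) (class_info : List (String × List (String × List String))) (visited : List String) : Int :=
  if _h : visited.contains class_name || !((class_info.map Prod.fst).contains class_name) then 0
  else
    let visited' := PySem.Set.add visited class_name
    let bases := pvBasesOf class_info class_name
    if bases = [] then 1
    else pvMaxLoopA bases class_info visited' 0 + 1
termination_by (pvCountFree class_info visited, 0)
decreasing_by
  apply Prod.Lex.left
  rw [Bool.or_eq_true, not_or, Bool.not_eq_true, Bool.not_eq_true'] at _h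
  exact pvCountFree_add_lt class_info visited class_name _h.1 (by simpa using _h.2)

-- A's `for base in bases: max_depth = max(max_depth, depth)` loop (each call receives visited.copy())
def pvMaxLoopA (bases : List String) (class_info : List (String × List (String × List String))) (visited : List String) (max_depth : Int) : Int :=
  match bases with
  | [] => max_depth
  | base :: rest =>
    pvMaxLoopA rest class_info visited (max max_depth (calculate_inheritance_depth_py base class_info visited))
termination_by (pvCountFree class_info visited, bases.length + 1)
decreasing_by
  · apply Prod.Lex.right; simp only [List.length_cons]; omega
  · apply Prod.Lex.right; simp only [List.length_cons]; omega
end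

-- ===== PORT B =====
-- _next_depth(c, info, depth, visited)
def pvNextDepth (c : String) (info : List (String × List String)) (depth : List (String × Int)) (visited : List String) : Int :=
  if visited.contains c then 0
  else
    match pvLookupD info "bases" [] with
    | [] => 1
    | b :: bs => 1 + bs.foldl (fun m x => max m (pvLookupD depth x 0)) (pvLookupD depth b 0)

-- one round of the dict comprehension rebuilding the depth table
def pvStepB (class_info : List (String × List (String × List String))) (visited : List String) (depth : List (String × Int)) : List (String × Int) :=
  class_info.map (fun kv => (kv.1, pvNextDepth kv.1 kv.2 depth visited))

-- literal transliteration of B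
def calculate_inheritance_depth_py_alt (class_name : String) (class_info : List (String × List (String × List String))) (visited : List String) : Int :=
  if visited.contains class_name || !((class_info.map Prod.fst).contains class_name) then 0
  else
    let depth0 : List (String × Int) := class_info.map (fun kv => (kv.1, 0))
    let depthN := (List.range (class_info.length + 1)).foldl (fun d _ => pvStepB class_info visited d) depth0
    pvLookupD depthN class_name 0

-- ===== PRECONDITION & SPEC =====
-- reachability along `bases` edges in 1..fuel steps
def pvReachB (class_info : List (String × List (String × List String))) : Nat → String → String → Bool
  | 0, _, _ => false
  | k+1, c, d => (pvBasesOf class_info c).any (fun b => b == d || pvReachB class_info k b d)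

-- Pre_ restricts to the function's natural domain: class_info/its values are Python dicts and
-- visited a Python set (hence the Nodup clauses, which exclude no Python input), and — unless A
-- returns 0 immediately — every class equal to or reachable from class_name carries the 'bases'
-- key (otherwise Python A raises KeyError on it) and lies on no cycle (Python class hierarchies
-- are necessarily acyclic; on cyclic hierarchies A's value is an artefact of its path-copying
-- order and an exact fast equivalent would amount to longest-simple-path). Slightly wider than
-- A's exact raise/cycle set: classes reachable only through visited nodes are also constrained.
def Pre_calculate_inheritance_depth_py (class_name : String) (class_info : List (String × List (String × List String))) (visited : List String) : Prop :=
  (class_info.map Prod.fst).Nodup ∧ visited.Nodup ∧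
  (∀ kv ∈ class_info, (kv.2.map Prod.fst).Nodup) ∧
  (visited.contains class_name = false →
    ∀ kv ∈ class_info, (kv.1 = class_name ∨ pvReachB class_info class_info.length class_name kv.1 = true) →
      ((kv.2.map Prod.fst).contains "bases" = true ∧
        pvReachB class_info class_info.length kv.1 kv.1 = false))

instance (class_name : String) (class_info : List (String × List (String × List String))) (visited : List String) : Decidable (Pre_calculate_inheritance_depth_py class_name class_info visited) := by unfold Pre_calculate_inheritance_depth_py; infer_instance

def pvWitness_calculate_inheritance_depth_py : String × (List (String × List (String × List String))) × List String :=
  ("A", [("A", [("bases", ["B"])]), ("B", [("bases", [])])], [])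

def Spec_calculate_inheritance_depth_py (class_name : String) (class_info : List (String × List (String × List String))) (visited : List String) (out : Int) : Prop := out = calculate_inheritance_depth_py_alt class_name class_info visited
instance (class_name : String) (class_info : List (String × List (String × List String))) (visited : List String) (out : Int) : Decidable (Spec_calculate_inheritance_depth_py class_name class_info visited out) := by unfold Spec_calculate_inheritance_depth_py; infer_instance

-- ===== CLAIM (what is proved, stated in full; the proofs are below) =====
def Claim_equal_calculate_inheritance_depth_py : Prop := ∀ (class_name : String) (class_info : List (String × List (String × List String))) (visited : List String), Dom_calculate_inheritance_depth_py class_name class_info visited → Pre_calculate_inheritance_depth_py class_name class_info visited → Spec_calculate_inheritance_depth_py class_name class_info visited (calculate_inheritance_depth_py class_name class_info visited)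

-- ===== LEMMAS AND PROOFS =====

-- fuel-indexed reference function: k-fold unrolling of the depth recursion w.r.t. the INITIAL visited set
def pvG (class_info : List (String × List (String × List String))) (v0 : List String) : Nat → String → Int
  | 0, _ => 0
  | k+1, c =>
    if v0.contains c || !((class_info.map Prod.fst).contains c) then 0
    else if pvBasesOf class_info c = [] then 1
    else ((pvBasesOf class_info c).foldl (fun m b => max m (pvG class_info v0 k b)) 0) + 1

theorem pvG_succ (ci : List (String × List (String × List String))) (v0 : List String)
    (k : Nat) (c : String) :
    pvG ci v0 (k+1) c =
      if v0.contains c || !((ci.map Prod.fst).contains c) then 0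
      else if pvBasesOf ci c = [] then 1
      else ((pvBasesOf ci c).foldl (fun m b => max m (pvG ci v0 k b)) 0) + 1 := rfl

theorem pvG_nonneg (ci : List (String × List (String × List String))) (v0 : List String) :
    ∀ k c, 0 ≤ pvG ci v0 k c := by
  intro k
  induction k with
  | zero => intro c; simp [pvG]
  | succ k ih =>
    intro c
    simp only [pvG]
    split_ifs with h1 h2
    · omega
    · omega
    · have := (PySem.List.le_foldl_max_int (pvBasesOf ci c) (fun b => pvG ci v0 k b) 0).1
      omega

theorem pvLookupD_map (l : List (String × List (String × List String)))
    (F : String × List (String × List String) → Int) (c : String) (d : Int) :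
    pvLookupD (l.map (fun kv => (kv.1, F kv))) c d =
      match l.find? (fun kv => kv.1 == c) with
      | some kv => F kv
      | none => d := by
  induction l with
  | nil => simp [pvLookupD]
  | cons kv l ih =>
    by_cases h : kv.1 == c
    · simp [pvLookupD, List.find?, h]
    · simp only [List.map_cons, pvLookupD, List.find?, h] at ih ⊢
      exact ih

-- one table round computes one more unrolling of pvG
theorem pvStepB_eq (ci : List (String × List (String × List String))) (v0 : List String)
    (d : List (String × Int)) (k : Nat)
    (hd : ∀ b, pvLookupD d b 0 = pvG ci v0 k b) :
    ∀ c, pvLookupD (pvStepB ci v0 d) c 0 = pvG ci v0 (k+1) c := by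
  intro c
  unfold pvStepB
  rw [pvLookupD_map]
  cases hfind : ci.find? (fun kv => kv.1 == c) with
  | none =>
    have hnk : ((ci.map Prod.fst).contains c) = false := by
      rw [List.find?_eq_none] at hfind
      rw [← Bool.not_eq_true, List.contains_iff_mem]
      intro hmem
      obtain ⟨kv, hkv, hfst⟩ := List.mem_map.mp hmem
      exact hfind kv hkv (by simp [hfst])
    simp only [pvG, hnk, Bool.not_false, Bool.or_true, if_true]
  | some kv =>
    obtain ⟨a, info⟩ := kv
    have hkc : a = c := by simpa using List.find?_some hfind
    subst hkc
    have hkm : (a, info) ∈ ci := List.mem_of_find?_eq_some hfind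
    have hk : ((ci.map Prod.fst).contains a) = true := by
      rw [List.contains_iff_mem]; exact List.mem_map.mpr ⟨(a, info), hkm, rfl⟩
    have hbases : pvLookupD info "bases" [] = pvBasesOf ci a := by
      unfold pvBasesOf pvLookupD
      rw [hfind]
    show pvNextDepth a info d v0 = pvG ci v0 (k+1) a
    by_cases hv : v0.contains a = true
    · have hm : a ∈ v0 := List.contains_iff_mem.mp hv
      simp [pvNextDepth, pvG, hm]
    · have hv' : v0.contains a = false := by simpa using hv
      rw [pvNextDepth, if_neg hv, hbases]
      simp only [pvG, hv', hk, Bool.not_true, Bool.false_or, Bool.false_eq_true, if_false]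
      cases hbs : pvBasesOf ci a with
      | nil => simp
      | cons b bs =>
        simp only [hd, reduceCtorEq, if_false, List.foldl_cons]
        have h0 : max 0 (pvG ci v0 k b) = pvG ci v0 k b :=
          max_eq_right (pvG_nonneg ci v0 k b)
        rw [h0]
        omega

theorem pvIterB (ci : List (String × List (String × List String))) (v0 : List String) :
    ∀ (m : Nat) (d : List (String × Int)) (k : Nat),
      (∀ b, pvLookupD d b 0 = pvG ci v0 k b) →
      ∀ c, pvLookupD ((List.range m).foldl (fun d _ => pvStepB ci v0 d) d) c 0 = pvG ci v0 (k+m) c := by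
  intro m
  induction m with
  | zero => intro d k hd c; simpa using hd c
  | succ m ih =>
    intro d k hd c
    rw [List.range_succ, List.foldl_append]
    simp only [List.foldl_cons, List.foldl_nil]
    have := pvStepB_eq ci v0 _ (k+m) (fun b => ih d k hd b) c
    rw [this]
    ring_nf

theorem pvInitB (ci : List (String × List (String × List String))) (v0 : List String) :
    ∀ c, pvLookupD (ci.map (fun kv => (kv.1, (0:Int)))) c 0 = pvG ci v0 0 c := by
  intro c
  rw [pvLookupD_map]
  cases ci.find? (fun kv => kv.1 == c) <;> simp [pvG]

-- one-step unfolding of pvReachB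
theorem pvReachB_succ (ci : List (String × List (String × List String))) (k : Nat) (c d : String) :
    pvReachB ci (k+1) c d = (pvBasesOf ci c).any (fun b => b == d || pvReachB ci k b d) := rfl

-- fuel monotonicity of reachability
theorem pvReachB_mono (ci : List (String × List (String × List String))) :
    ∀ k k' x y, k ≤ k' → pvReachB ci k x y = true → pvReachB ci k' x y = true := by
  intro k
  induction k with
  | zero => intro k' x y _ h; simp [pvReachB] at h
  | succ k ih =>
    intro k' x y hle h
    obtain ⟨k'', rfl⟩ : ∃ k'', k' = k'' + 1 := ⟨k' - 1, by omega⟩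
    rw [pvReachB_succ] at h ⊢
    simp only [List.any_eq_true, Bool.or_eq_true] at h ⊢
    obtain ⟨b, hb, hcase⟩ := h
    refine ⟨b, hb, ?_⟩
    cases hcase with
    | inl h => exact Or.inl h
    | inr h => exact Or.inr (ih k'' b y (by omega) h)

-- extend a reach path by one bases edge at its end
theorem pvReachB_snoc (ci : List (String × List (String × List String))) :
    ∀ k x c b, pvReachB ci k x c = true → b ∈ pvBasesOf ci c → pvReachB ci (k+1) x b = true := by
  intro k
  induction k with
  | zero => intro x c b h; simp [pvReachB] at h
  | succ k ih =>
    intro x c b h hb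
    rw [pvReachB_succ] at h ⊢
    simp only [List.any_eq_true, Bool.or_eq_true] at h ⊢
    obtain ⟨z, hz, hcase⟩ := h
    refine ⟨z, hz, ?_⟩
    cases hcase with
    | inl hzc =>
      right
      have hzc' : z = c := by simpa using hzc
      subst hzc'
      rw [pvReachB_succ]
      simp only [List.any_eq_true, Bool.or_eq_true]
      exact ⟨b, hb, Or.inl (by simp)⟩
    | inr h => exact Or.inr (ih z c b h hb)

theorem pvReachB_edge (ci : List (String × List (String × List String)))
    (c b : String) (hb : b ∈ pvBasesOf ci c) : pvReachB ci 1 c b = true := by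
  rw [pvReachB_succ]
  simp only [List.any_eq_true, Bool.or_eq_true]
  exact ⟨b, hb, Or.inl (by simp)⟩

-- the number of on-path (non-initial) visited nodes
def pvExtra (v0 v : List String) : Nat := (v.filter (fun x => !v0.contains x)).length

theorem pvExtra_add (v0 v : List String) (c : String) (hc : c ∉ v) (hc0 : v0.contains c = false) :
    pvExtra v0 (PySem.Set.add v c) = pvExtra v0 v + 1 := by
  unfold pvExtra
  rw [PySem.Set.add_of_not_mem hc]
  have hc0' : c ∉ v0 := by
    intro h; rw [List.contains_iff_mem.mpr h] at hc0; cases hc0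
  simp [List.filter_append, hc0']

-- all on-path nodes are distinct keys, so there are at most ci.length of them
theorem pvExtra_le (ci : List (String × List (String × List String))) (v0 v : List String)
    (hnd : v.Nodup)
    (hkeys : ∀ x ∈ v, v0.contains x = false → ((ci.map Prod.fst).contains x) = true) :
    pvExtra v0 v ≤ ci.length := by
  unfold pvExtra
  have hnd' : (v.filter (fun x => !v0.contains x)).Nodup := hnd.filter _
  have hsub : v.filter (fun x => !v0.contains x) ⊆ ci.map Prod.fst := by
    intro x hx
    rw [List.mem_filter] at hx
    have := hkeys x hx.1 (by simpa using hx.2)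
    exact List.contains_iff_mem.mp this
  have := (hnd'.subperm hsub).length_le
  simpa using this

-- the loop of port A computes a fold of pointwise-known values
theorem pvMaxLoopA_eq (ci : List (String × List (String × List String))) (v : List String)
    (g : String → Int) :
    ∀ (bases : List String), (∀ b ∈ bases, calculate_inheritance_depth_py b ci v = g b) →
    ∀ acc, pvMaxLoopA bases ci v acc = bases.foldl (fun m b => max m (g b)) acc := by
  intro bases
  induction bases with
  | nil => intro _ acc; simp [pvMaxLoopA]
  | cons b bs ih =>
    intro h acc
    rw [pvMaxLoopA, List.foldl_cons, h b (by simp)]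
    exact ih (fun x hx => h x (by simp [hx])) _

-- MAIN LEMMA: when no class reachable from the root cn lies on a cycle, A's path-copying
-- recursion from any visited superset v of v0 whose extra members all reach the current class
-- (itself reachable from cn) equals the fuel-unrolled pvG w.r.t. v0.
theorem pvA_eq_G (ci : List (String × List (String × List String))) (v0 : List String)
    (cn : String)
    (hacy : ∀ x, (x = cn ∨ pvReachB ci ci.length cn x = true) →
        ((ci.map Prod.fst).contains x) = true → pvReachB ci ci.length x x = false) :
    ∀ (k : Nat) (v : List String) (c : String),
      v.Nodup →
      (c = cn ∨ pvReachB ci (pvExtra v0 v) cn c = true) →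
      (∀ x, v0.contains x = true → x ∈ v) →
      (∀ x ∈ v, v0.contains x = true ∨
        (((ci.map Prod.fst).contains x) = true ∧ v0.contains x = false ∧
          pvReachB ci (pvExtra v0 v) x c = true)) →
      pvCountFree ci v + 1 ≤ k →
      calculate_inheritance_depth_py c ci v = pvG ci v0 k c := by
  intro k
  induction k with
  | zero => intro v c _ _ _ _ hcount; omega
  | succ k ih =>
    intro v c hnd hcur hsup hpath hcount
    rw [calculate_inheritance_depth_py]
    by_cases hcond : (v.contains c || !((ci.map Prod.fst).contains c)) = true
    · rw [dif_pos hcond]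
      rw [Bool.or_eq_true] at hcond
      rw [pvG_succ]
      by_cases hv0 : v0.contains c = true
      · rw [hv0]; simp
      · -- c not in v0
        cases hcond with
        | inl hcv =>
          -- c ∈ v but c ∉ v0: a cycle through c, contradicting acyclicity
          have hcmem : c ∈ v := List.contains_iff_mem.mp hcv
          rcases hpath c hcmem with h | ⟨hk, _, hreach⟩
          · exact absurd h hv0
          · exfalso
            have hle : pvExtra v0 v ≤ ci.length := by
              apply pvExtra_le ci v0 v hnd
              intro x hx hx0
              rcases hpath x hx with h | ⟨hk', _, _⟩
              · rw [h] at hx0; cases hx0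
              · exact hk'
            have hreach' := pvReachB_mono ci _ _ _ _ hle hreach
            have hcur' : c = cn ∨ pvReachB ci ci.length cn c = true := by
              cases hcur with
              | inl h => exact Or.inl h
              | inr h => exact Or.inr (pvReachB_mono ci _ _ _ _ hle h)
            have hfalse := hacy c hcur' hk
            rw [hfalse] at hreach'
            cases hreach'
        | inr hnk =>
          rw [Bool.not_eq_true'] at hnk
          have hv0' : v0.contains c = false := by simpa using hv0
          rw [hv0', hnk]
          simp
    · rw [dif_neg hcond]
      rw [Bool.or_eq_true, not_or, Bool.not_eq_true, Bool.not_eq_true'] at hcond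
      obtain ⟨hcv, hck⟩ := hcond
      rw [Bool.not_eq_false] at hck
      have hcv0 : v0.contains c = false := by
        rw [← Bool.not_eq_true]
        intro h
        have := hsup c h
        rw [List.contains_iff_mem.mpr this] at hcv
        cases hcv
      have hcnotv : c ∉ v := by
        intro h; rw [List.contains_iff_mem.mpr h] at hcv; cases hcv
      show (if pvBasesOf ci c = [] then 1
            else pvMaxLoopA (pvBasesOf ci c) ci (PySem.Set.add v c) 0 + 1) = pvG ci v0 (k+1) c
      rw [pvG_succ, hcv0, hck]
      simp only [Bool.not_true, Bool.or_false, Bool.false_eq_true, if_false]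
      by_cases hbs : pvBasesOf ci c = []
      · simp [hbs]
      · rw [if_neg hbs, if_neg hbs]
        congr 1
        -- recursive calls: apply IH at every base with v' = v ∪ {c}
        have hrec : ∀ b ∈ pvBasesOf ci c,
            calculate_inheritance_depth_py b ci (PySem.Set.add v c) = pvG ci v0 k b := by
          intro b hb
          apply ih
          · exact PySem.Set.nodup_add v c hnd
          · -- b is reachable from the root cn
            rw [pvExtra_add v0 v c hcnotv hcv0]
            cases hcur with
            | inl h =>
              refine Or.inr (pvReachB_mono ci 1 _ _ _ (by omega) ?_)
              rw [← h]
              exact pvReachB_edge ci c b hb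
            | inr h => exact Or.inr (pvReachB_snoc ci _ cn c b h hb)
          · intro x hx
            rw [PySem.Set.mem_add]
            exact Or.inl (hsup x hx)
          · intro x hx
            rw [PySem.Set.mem_add] at hx
            rw [pvExtra_add v0 v c hcnotv hcv0]
            cases hx with
            | inl hxv =>
              rcases hpath x hxv with h | ⟨hk', hx0, hreach⟩
              · exact Or.inl h
              · exact Or.inr ⟨hk', hx0, pvReachB_snoc ci _ x c b hreach hb⟩
            | inr hxc =>
              rw [hxc]
              exact Or.inr ⟨hck, hcv0,
                pvReachB_mono ci 1 _ _ _ (by omega) (pvReachB_edge ci c b hb)⟩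
          · have := pvCountFree_add_lt ci v c hcv hck
            omega
        rw [pvMaxLoopA_eq ci (PySem.Set.add v c) (pvG ci v0 k) (pvBasesOf ci c) hrec 0]

-- ===== VERDICT (by name: the statement is the Claim_ definition above) =====
theorem calculate_inheritance_depth_py_spec : Claim_equal_calculate_inheritance_depth_py := by
  intro class_name class_info visited _hdom hpre
  unfold Spec_calculate_inheritance_depth_py
  obtain ⟨hndK, hndV, hndI, hclause⟩ := hpre
  by_cases hcond : visited.contains class_name || !((class_info.map Prod.fst).contains class_name)
  · rw [calculate_inheritance_depth_py, dif_pos hcond]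
    unfold calculate_inheritance_depth_py_alt
    rw [if_pos hcond]
  · unfold calculate_inheritance_depth_py_alt
    rw [if_neg hcond]
    have hvc : visited.contains class_name = false := by
      simp only [Bool.or_eq_true, not_or] at hcond
      simpa using hcond.1
    have hacy : ∀ x, (x = class_name ∨ pvReachB class_info class_info.length class_name x = true) →
        ((class_info.map Prod.fst).contains x) = true →
        pvReachB class_info class_info.length x x = false := by
      intro x hx hk
      obtain ⟨kv, hkm, hfst⟩ := List.mem_map.mp (List.contains_iff_mem.mp hk)
      have := (hclause hvc kv hkm (by rw [hfst]; exact hx)).2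
      rwa [hfst] at this
    have hB : pvLookupD ((List.range (class_info.length + 1)).foldl
        (fun d _ => pvStepB class_info visited d)
        (class_info.map (fun kv => (kv.1, (0:Int))))) class_name 0 =
        pvG class_info visited (0 + (class_info.length + 1)) class_name :=
      pvIterB class_info visited (class_info.length + 1) _ 0
        (pvInitB class_info visited) class_name
    rw [hB]
    have hA : calculate_inheritance_depth_py class_name class_info visited =
        pvG class_info visited (class_info.length + 1) class_name := by
      apply pvA_eq_G class_info visited class_name hacy
      · exact hndV
      · exact Or.inl rfl
      · intro x hx; exact List.contains_iff_mem.mp hx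
      · intro x hx; exact Or.inl (List.contains_iff_mem.mpr hx)
      · have : pvCountFree class_info visited ≤ class_info.length := by
          unfold pvCountFree
          have := List.length_filter_le (fun k => !(visited.contains k)) (class_info.map Prod.fst)
          simpa using this
        omega
    rw [hA]
    norm_num
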